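-- pv_equiv track=rewrite | github.com/Aamir7693/Opti-Q | old/main.py | is_valid_dag_structure
-- ===== SOURCE A (Python) =====
-- def mask_to_adj(k: int, mask: int):
--     adj = [[0] * k for _ in range(k)]
--     bit_index = 0
--     for i in range(k - 1):
--         for j in range(i + 1, k):
--             if mask & (1 << bit_index):
--                 adj[i][j] = 1
--             bit_index += 1
--     return adj
--
-- def is_valid_dag_structure(struct_id, k):
--     """Check if structure is valid DAG"""
--     adj = mask_to_adj(k, struct_id)
--
--     # Check single sink (only last node has out-degree 0)
--     outdeg = [sum(adj[i]) for i in range(k)]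
--     if any(outdeg[i] == 0 for i in range(k-1)):
--         return False
--     if outdeg[k-1] != 0:
--         return False
--
--     return True
-- ===== SOURCE B (Python) =====
-- def is_valid_dag_structure(struct_id, k):
--     """Check if structure is valid DAG"""
--     # Extract each node's contiguous out-edge bit block straight from struct_id:
--     # node i owns the (k-1-i) bits starting at offset off; no adjacency matrix needed.
--     nonzero = []
--     off = 0
--     for i in range(k):
--         w = k - 1 - i
--         nonzero.append((struct_id >> off) % (1 << w) != 0)
--         off += w
--     if any(not nonzero[i] for i in range(k - 1)):
--         return False
--     if nonzero[k - 1]: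
--         return False
--     return True
-- ===== Notes on version B (the rewrite author's own statement) =====
-- stated objective: faster
-- what changed: B drops mask_to_adj and the k×k adjacency matrix entirely: each node's out-edges form a contiguous bit block of struct_id, so B reads that block directly with one shift and one modulus per node and records one boolean, keeping A's final single-sink checks.
import Mathlib
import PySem

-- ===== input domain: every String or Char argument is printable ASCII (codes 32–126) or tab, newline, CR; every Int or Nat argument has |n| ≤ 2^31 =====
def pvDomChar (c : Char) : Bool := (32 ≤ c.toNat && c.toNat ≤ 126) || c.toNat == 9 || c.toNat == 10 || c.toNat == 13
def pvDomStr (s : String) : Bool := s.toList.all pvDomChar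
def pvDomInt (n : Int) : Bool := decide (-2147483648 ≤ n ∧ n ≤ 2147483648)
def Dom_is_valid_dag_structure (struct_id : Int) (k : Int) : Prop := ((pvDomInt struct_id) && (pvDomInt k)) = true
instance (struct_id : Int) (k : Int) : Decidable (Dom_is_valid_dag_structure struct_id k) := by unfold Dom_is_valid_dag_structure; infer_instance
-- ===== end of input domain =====

-- B replaces A's k×k adjacency matrix by reading each node's contiguous out-edge bit block
-- of struct_id directly with one shift and one modulus per node (objective: faster, O(k) vs O(k^2) operations).

-- ===== PORT A =====
-- adj[i][j] = v ; at every call site 0 ≤ i, j < len(adj), so .toNat is exact there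
def pvSetIJ (adj : List (List Int)) (i j : Int) (v : Int) : List (List Int) :=
  adj.set i.toNat ((adj.getD i.toNat []).set j.toNat v)

def mask_to_adj (k : Int) (mask : Int) : List (List Int) :=
  -- adj = [[0] * k for _ in range(k)]
  let adj := (PySem.List.pyRange 0 k).map (fun _ => (PySem.List.pyRange 0 k).map (fun _ => (0 : Int)))
  -- bit_index starts at 0 and is only ever incremented: a Nat counter is exact
  let st := (PySem.List.pyRange 0 (k - 1)).foldl
    (fun (st : List (List Int) × Nat) i =>
      (PySem.List.pyRange (i + 1) k).foldl
        (fun (st : List (List Int) × Nat) j =>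
          ((if PySem.Int.band mask (1 <<< st.2) ≠ 0 then pvSetIJ st.1 i j 1 else st.1), st.2 + 1))
        st)
    (adj, 0)
  st.1

def is_valid_dag_structure (struct_id : Int) (k : Int) : Bool :=
  let adj := mask_to_adj k struct_id
  -- adj[i] for i in range(k) and outdeg[i] for i in range(k-1) are always in range;
  -- outdeg[k-1] is an IndexError exactly when k ≤ 0 (excluded by Pre_): the .getD defaults are unreachable inside Pre_
  let outdeg := (PySem.List.pyRange 0 k).map (fun i => ((PySem.List.pyGet? adj i).getD []).sum)
  if (PySem.List.pyRange 0 (k - 1)).any (fun i => (PySem.List.pyGet? outdeg i).getD 0 == 0) then false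
  else if (PySem.List.pyGet? outdeg (k - 1)).getD 0 != 0 then false
  else true

-- ===== PORT B =====
def is_valid_dag_structure_alt (struct_id : Int) (k : Int) : Bool :=
  -- off starts at 0 and only grows by w = (k-1-i) ≥ 0 (i ∈ range(k)): a Nat counter and .toNat are exact;
  -- nonzero[k-1] is an IndexError exactly when k ≤ 0 (excluded by Pre_): the .getD defaults are unreachable inside Pre_
  let st := (PySem.List.pyRange 0 k).foldl
    (fun (st : List Bool × Nat) i =>
      let w := (k - 1 - i).toNat
      (st.1 ++ [decide (PySem.Int.mod (struct_id >>> st.2) (1 <<< w) ≠ 0)], st.2 + w))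
    ([], 0)
  let nonzero := st.1
  if (PySem.List.pyRange 0 (k - 1)).any (fun i => !(PySem.List.pyGet? nonzero i).getD false) then false
  else if (PySem.List.pyGet? nonzero (k - 1)).getD false then false
  else true

-- ===== PRECONDITION & SPEC =====
-- A (and B) raise IndexError on k ≤ 0 (outdeg[k-1] / nonzero[k-1] on an empty list); Pre_ excludes exactly those inputs.
def Pre_is_valid_dag_structure (struct_id : Int) (k : Int) : Prop := 1 ≤ k
instance (struct_id : Int) (k : Int) : Decidable (Pre_is_valid_dag_structure struct_id k) := by unfold Pre_is_valid_dag_structure; infer_instance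
def pvWitness_is_valid_dag_structure : Int × Int := (5, 3)

def Spec_is_valid_dag_structure (struct_id : Int) (k : Int) (out : Bool) : Prop := out = is_valid_dag_structure_alt struct_id k
instance (struct_id : Int) (k : Int) (out : Bool) : Decidable (Spec_is_valid_dag_structure struct_id k out) := by unfold Spec_is_valid_dag_structure; infer_instance

-- ===== CLAIM (what is proved, stated in full; the proofs are below) =====
def Claim_equal_is_valid_dag_structure : Prop := ∀ (struct_id : Int) (k : Int), Dom_is_valid_dag_structure struct_id k → Pre_is_valid_dag_structure struct_id k → Spec_is_valid_dag_structure struct_id k (is_valid_dag_structure struct_id k)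

-- ===== LEMMAS AND PROOFS =====

-- number of set bits of m among bit positions b, b+1, …, b+n-1 (A's bit test, verbatim)
def pvCount (m : Int) : Nat → Nat → Nat
  | _, 0 => 0
  | b, n + 1 => (if PySem.Int.band m (1 <<< b) ≠ 0 then 1 else 0) + pvCount m (b + 1) n

-- offset of block t among blocks of widths n, n-1, n-2, …
def pvOff : Nat → Nat → Nat
  | _, 0 => 0
  | 0, _ + 1 => 0
  | n + 1, t + 1 => (n + 1) + pvOff n t

-- B's per-node booleans, for n nodes with widths n-1, n-2, …, 0, bits from position b
def pvNz (m : Int) : Nat → Nat → List Bool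
  | _, 0 => []
  | b, n + 1 => decide (PySem.Int.mod (m >>> b) (1 <<< n) ≠ 0) :: pvNz m (b + n) n

-- total number of bits in blocks of widths n-1, n-2, …, 0
def pvTot : Nat → Nat
  | 0 => 0
  | n + 1 => n + pvTot n

-- ---- arithmetic bridges ----

theorem pv_negdiv (x N : Int) (h : 0 < N) : (-x - 1) / N = -(x / N) - 1 ∧ (-x - 1) % N = N - 1 - x % N := by
  have h1 := Int.ediv_add_emod x N
  have h2 : 0 ≤ x % N := Int.emod_nonneg x (by omega)
  have h3 : x % N < N := Int.emod_lt_of_pos x h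
  have := (Int.ediv_emod_unique (a := -x - 1) (b := N) (q := -(x / N) - 1) (r := N - 1 - x % N) h).mpr
    ⟨by linear_combination -h1, by omega, by omega⟩
  exact ⟨this.1, this.2⟩

theorem pv_band_two_pow (m : Int) (b : Nat) :
    (PySem.Int.band m ((1 <<< b : Nat) : Int) ≠ 0) ↔ (m >>> b) % 2 = 1 := by
  have hp : (1 <<< b : Nat) = 2 ^ b := Nat.one_shiftLeft b
  have h2b : 0 < 2 ^ b := Nat.two_pow_pos b
  rcases le_or_gt 0 m with hm | hm
  · obtain ⟨a, rfl⟩ : ∃ a : Nat, m = (a : Int) := ⟨m.toNat, by omega⟩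
    rw [PySem.Int.band_of_nonneg (by positivity) (by positivity)]
    simp only [Int.toNat_natCast, hp]
    rw [Nat.and_two_pow]
    have hr : ((a : Int) >>> b) % 2 = ((a / 2 ^ b % 2 : Nat) : Int) := by
      rw [Int.shiftRight_eq_div_pow]; push_cast; ring
    rw [hr]
    constructor
    · intro hne
      have htb : a.testBit b = true := by
        by_contra hf
        rw [Bool.not_eq_true] at hf
        simp [hf] at hne
      rw [Nat.testBit_eq_decide_div_mod_eq] at htb
      have := of_decide_eq_true htb
      exact_mod_cast this
    · intro h1
      have h1' : a / 2 ^ b % 2 = 1 := by exact_mod_cast h1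
      have htb : a.testBit b = true := by
        rw [Nat.testBit_eq_decide_div_mod_eq]; exact decide_eq_true h1'
      rw [htb]
      simp
  · have hn : (0 : Int) ≤ -m - 1 := by omega
    set n : Nat := (-m - 1).toNat with hn'
    have hmn : m = -(n : Int) - 1 := by omega
    have hband : PySem.Int.band m (((1 <<< b : Nat) : Int)) =
        (((1 <<< b : Nat) - ((1 <<< b : Nat) &&& n) : Nat) : Int) := by
      unfold PySem.Int.band
      rw [if_neg (by omega), if_pos (by positivity), Int.toNat_natCast, ← hn']
    have hAnd : 2 ^ b &&& n = (n.testBit b).toNat * 2 ^ b := by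
      rw [Nat.land_comm]; exact Nat.and_two_pow n b
    have hdiv := pv_negdiv (x := (n : Int)) (N := ((2 ^ b : Nat) : Int)) (by positivity)
    have hmod2 := pv_negdiv (x := ((n : Int) / ((2 ^ b : Nat) : Int))) (N := 2) (by omega)
    have hsr : m >>> b = -((n : Int) / ((2 ^ b : Nat) : Int)) - 1 := by
      rw [Int.shiftRight_eq_div_pow, hmn]
      exact hdiv.1
    rw [hband, hp, hAnd, hsr, hmod2.2]
    have hc : (n : Int) / ((2 ^ b : Nat) : Int) = ((n / 2 ^ b : Nat) : Int) := by
      push_cast; ring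
    rw [hc]
    have hcm : ((n / 2 ^ b : Nat) : Int) % 2 = ((n / 2 ^ b % 2 : Nat) : Int) := by
      push_cast; ring
    rw [hcm, Nat.testBit_eq_decide_div_mod_eq]
    have hmlt : (n / 2 ^ b : Nat) % 2 < 2 := Nat.mod_lt _ (by omega)
    by_cases hbit : n / 2 ^ b % 2 = 1
    · simp [hbit]
    · have h0 : n / 2 ^ b % 2 = 0 := by omega
      simp [h0]

theorem pv_split2 (y N : Int) (h : 0 < N) : y % (2 * N) = y % 2 + 2 * (y / 2 % N) := by
  have h1 := Int.ediv_add_emod y 2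
  have h2 := Int.ediv_add_emod (y / 2) N
  have hr1 : 0 ≤ y % 2 ∧ y % 2 < 2 := ⟨Int.emod_nonneg y (by omega), Int.emod_lt_of_pos y (by omega)⟩
  have hr2 : 0 ≤ y / 2 % N ∧ y / 2 % N < N := ⟨Int.emod_nonneg _ (by omega), Int.emod_lt_of_pos _ h⟩
  have := (Int.ediv_emod_unique (a := y) (b := 2 * N) (q := y / 2 / N) (r := y % 2 + 2 * (y / 2 % N)) (by omega)).mpr
    ⟨by nlinarith, by omega, by omega⟩
  exact this.2

theorem pv_mod_count (m : Int) (b w : Nat) :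
    (PySem.Int.mod (m >>> b) ((1 <<< w : Nat) : Int) ≠ 0) ↔ pvCount m b w ≠ 0 := by
  induction w generalizing b with
  | zero =>
    simp only [pvCount]
    have h1 : ((1 <<< 0 : Nat) : Int) = 1 := by decide
    rw [h1, PySem.Int.mod_eq_emod_of_pos (by omega)]
    simp
  | succ n ih =>
    have hcsh : ∀ w : Nat, ((1 <<< w : Nat) : Int) = (2 : Int) ^ w := by
      intro w; rw [Nat.one_shiftLeft]; push_cast; ring
    have hppos : (0 : Int) < ((1 <<< n : Nat) : Int) := by
      rw [hcsh]; positivity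
    rw [PySem.Int.mod_eq_emod_of_pos (by rw [hcsh]; positivity), hcsh, pow_succ,
      mul_comm ((2 : Int) ^ n) 2, pv_split2 (m >>> b) ((2 : Int) ^ n) (by positivity)]
    have hdd : (m >>> b) / 2 = m >>> (b + 1) := by
      rw [Int.shiftRight_eq_div_pow, Int.shiftRight_eq_div_pow,
        show ((2 ^ (b + 1) : Nat) : Int) = ((2 ^ b : Nat) : Int) * 2 by push_cast; ring,
        Int.ediv_ediv_eq_ediv_mul]
      positivity
    rw [hdd]
    have hone := pv_band_two_pow m b
    have hih := ih (b + 1)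
    rw [PySem.Int.mod_eq_emod_of_pos hppos, hcsh] at hih
    simp only [pvCount]
    have h2 : 0 ≤ (m >>> b) % 2 ∧ (m >>> b) % 2 < 2 :=
      ⟨Int.emod_nonneg _ (by omega), Int.emod_lt_of_pos _ (by omega)⟩
    have h3 : 0 ≤ m >>> (b + 1) % ((2 : Int) ^ n) := Int.emod_nonneg _ (by positivity)
    by_cases hb : PySem.Int.band m ((1 <<< b : Nat) : Int) ≠ 0
    · simp only [if_pos hb]
      have hr := hone.mp hb
      constructor <;> intro _ <;> omega
    · simp only [if_neg hb]
      have hr : (m >>> b) % 2 = 0 := by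
        rcases (by omega : (m >>> b) % 2 = 0 ∨ (m >>> b) % 2 = 1) with h | h
        · exact h
        · exact absurd (hone.mpr h) hb
      constructor
      · intro hne
        have hs : m >>> (b + 1) % ((2 : Int) ^ n) ≠ 0 := by omega
        have := hih.mp hs
        omega
      · intro hne
        have : pvCount m (b + 1) n ≠ 0 := by omega
        have := hih.mpr this
        omega

-- ---- small list helpers ----

theorem pv_sum_set_one (L : List Int) (c : Nat) (hc : c < L.length) (h0 : L.getD c 0 = 0) :
    (L.set c 1).sum = L.sum + 1 := by
  induction L generalizing c with
  | nil => simp at hc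
  | cons x t ih =>
    cases c with
    | zero =>
      have hx : x = 0 := by simpa using h0
      have hset : (x :: t).set 0 1 = 1 :: t := rfl
      rw [hset]
      simp only [List.sum_cons]
      omega
    | succ c' =>
      have hrec := ih c' (by simpa using hc) (by simpa using h0)
      have hset : (x :: t).set (c' + 1) 1 = x :: t.set c' 1 := rfl
      rw [hset]
      simp only [List.sum_cons]
      omega

-- ---- A-side loop characterisation ----

-- the inner fold only ever rewrites row i: it equals a fold over that row alone
theorem pv_inner_as_row (mask : Int) (L : List Int) (i : Int) (adj : List (List Int)) (b : Nat)
    (hi : i.toNat < adj.length) :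
    L.foldl (fun (st : List (List Int) × Nat) j =>
        ((if PySem.Int.band mask (1 <<< st.2) ≠ 0 then pvSetIJ st.1 i j 1 else st.1), st.2 + 1)) (adj, b) =
      (adj.set i.toNat
        (L.foldl (fun (st : List Int × Nat) j =>
          ((if PySem.Int.band mask (1 <<< st.2) ≠ 0 then st.1.set j.toNat 1 else st.1), st.2 + 1))
          (adj.getD i.toNat [], b)).1,
       (L.foldl (fun (st : List Int × Nat) j =>
          ((if PySem.Int.band mask (1 <<< st.2) ≠ 0 then st.1.set j.toNat 1 else st.1), st.2 + 1))
          (adj.getD i.toNat [], b)).2) := by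
  induction L generalizing adj b with
  | nil =>
    simp only [List.foldl_nil]
    rw [List.getD_eq_getElem _ _ hi, List.set_getElem_self]
  | cons x t ih =>
    simp only [List.foldl_cons]
    by_cases hb : PySem.Int.band mask (1 <<< b) ≠ 0
    · simp only [if_pos hb]
      have hlen' : i.toNat < (pvSetIJ adj i x 1).length := by
        unfold pvSetIJ; simpa using hi
      have hgd : (pvSetIJ adj i x 1).getD i.toNat [] = (adj.getD i.toNat []).set x.toNat 1 := by
        unfold pvSetIJ
        rw [List.getD_eq_getElem _ _ (by simpa using hi), List.getElem_set_self]
      rw [ih (pvSetIJ adj i x 1) (b + 1) hlen', hgd]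
      unfold pvSetIJ
      rw [List.set_set]
    · simp only [if_neg hb]
      exact ih adj (b + 1) hi

-- row fold over the consecutive indices j, j+1, …, j+n-1 on a row that is 0 there
theorem pv_rowfold (mask : Int) (n : Nat) :
    ∀ (j : Int) (row : List Int) (b : Nat), 0 ≤ j → j + n ≤ (row.length : Int) →
    (∀ c : Nat, j ≤ (c : Int) → c < row.length → row.getD c 0 = 0) →
    ((PySem.List.pyRange j (j + n)).foldl (fun (st : List Int × Nat) jj =>
        ((if PySem.Int.band mask (1 <<< st.2) ≠ 0 then st.1.set jj.toNat 1 else st.1), st.2 + 1))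
        (row, b)).2 = b + n ∧
    ((PySem.List.pyRange j (j + n)).foldl (fun (st : List Int × Nat) jj =>
        ((if PySem.Int.band mask (1 <<< st.2) ≠ 0 then st.1.set jj.toNat 1 else st.1), st.2 + 1))
        (row, b)).1.sum = row.sum + (pvCount mask b n : Int) ∧
    ((PySem.List.pyRange j (j + n)).foldl (fun (st : List Int × Nat) jj =>
        ((if PySem.Int.band mask (1 <<< st.2) ≠ 0 then st.1.set jj.toNat 1 else st.1), st.2 + 1))
        (row, b)).1.length = row.length := by
  induction n with
  | zero =>
    intro j row b hj hlen hz
    have hnil : PySem.List.pyRange j (j + (0 : Nat)) = [] := by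
      simp [pysem]
    rw [hnil]
    simp [pvCount]
  | succ n ih =>
    intro j row b hj hlen hz
    have hcons : PySem.List.pyRange j (j + ((n + 1 : Nat) : Int)) =
        j :: PySem.List.pyRange (j + 1) (j + ((n + 1 : Nat) : Int)) :=
      PySem.List.pyRange_one_cons (by push_cast; omega)
    have hshift : j + ((n + 1 : Nat) : Int) = (j + 1) + (n : Nat) := by push_cast; ring
    rw [hcons, List.foldl_cons, hshift]
    have hjlt : j.toNat < row.length := by omega
    have hj0 : row.getD j.toNat 0 = 0 := hz j.toNat (by omega) hjlt
    set row' : List Int := if PySem.Int.band mask (1 <<< b) ≠ 0 then row.set j.toNat 1 else row with hrow'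
    have hlen' : row'.length = row.length := by
      rw [hrow']; split <;> simp
    have hz' : ∀ c : Nat, j + 1 ≤ (c : Int) → c < row'.length → row'.getD c 0 = 0 := by
      intro c hc1 hc2
      rw [hlen'] at hc2
      have hne : j.toNat ≠ c := by omega
      rw [hrow']
      split
      · rw [List.getD_eq_getElem?_getD, List.getElem?_set, if_neg hne,
          ← List.getD_eq_getElem?_getD]
        exact hz c (by omega) hc2
      · exact hz c (by omega) hc2
    have hsum' : row'.sum = row.sum + (if PySem.Int.band mask (1 <<< b) ≠ 0 then 1 else 0) := by
      rw [hrow']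
      split
      · rw [pv_sum_set_one row j.toNat hjlt hj0]
      · omega
    obtain ⟨ih1, ih2, ih3⟩ := ih (j + 1) row' (b + 1) (by omega) (by omega) hz'
    refine ⟨?_, ?_, ?_⟩
    · rw [ih1]; omega
    · rw [ih2, hsum']
      have : pvCount mask b (n + 1) =
          (if PySem.Int.band mask (1 <<< b) ≠ 0 then 1 else 0) + pvCount mask (b + 1) n := rfl
      rw [this]
      split <;> push_cast <;> ring
    · rw [ih3, hlen']

-- ---- B-side loop characterisation ----

theorem pv_nzfold (m k : Int) (n : Nat) :
    ∀ (i : Int) (acc : List Bool) (b : Nat), i + n = k →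
    (PySem.List.pyRange i k).foldl
      (fun (st : List Bool × Nat) i =>
        let w := (k - 1 - i).toNat
        (st.1 ++ [decide (PySem.Int.mod (m >>> st.2) (1 <<< w) ≠ 0)], st.2 + w)) (acc, b) =
    (acc ++ pvNz m b n, b + pvTot n) := by
  induction n with
  | zero =>
    intro i acc b hik
    have hnil : PySem.List.pyRange i k = [] := by
      have : k ≤ i := by omega
      simp [pysem, this]
    rw [hnil]
    simp [pvNz, pvTot]
  | succ n ih =>
    intro i acc b hik
    have hcons : PySem.List.pyRange i k = i :: PySem.List.pyRange (i + 1) k :=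
      PySem.List.pyRange_one_cons (by omega)
    rw [hcons, List.foldl_cons]
    have hw : (k - 1 - i).toNat = n := by omega
    simp only [hw]
    rw [ih (i + 1) _ (b + n) (by omega)]
    have : pvNz m b (n + 1) = decide (PySem.Int.mod (m >>> b) (1 <<< n) ≠ 0) :: pvNz m (b + n) n := rfl
    rw [this]
    have : pvTot (n + 1) = n + pvTot n := rfl
    rw [this]
    simp
    omega

theorem pv_nz_getD (m : Int) (t : Nat) :
    ∀ (n b : Nat), t ≤ n →
    (pvNz m b (n + 1)).getD t false =
      decide (PySem.Int.mod (m >>> (b + pvOff n t)) ((1 <<< (n - t) : Nat) : Int) ≠ 0) := by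
  induction t with
  | zero =>
    intro n b _
    simp [pvNz, pvOff]
  | succ t ih =>
    intro n b ht
    obtain ⟨n', rfl⟩ : ∃ n', n = n' + 1 := ⟨n - 1, by omega⟩
    have hstep : pvNz m b (n' + 1 + 1) =
        decide (PySem.Int.mod (m >>> b) (1 <<< (n' + 1)) ≠ 0) :: pvNz m (b + (n' + 1)) (n' + 1) := rfl
    rw [hstep]
    simp only [List.getD_cons_succ]
    rw [ih n' (b + (n' + 1)) (by omega)]
    have hoff : pvOff (n' + 1) (t + 1) = (n' + 1) + pvOff n' t := rfl
    rw [hoff]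
    have : b + (n' + 1) + pvOff n' t = b + ((n' + 1) + pvOff n' t) := by omega
    rw [this]
    have : n' + 1 - (t + 1) = n' - t := by omega
    rw [this]

theorem pv_nz_length (m : Int) (n : Nat) : ∀ b, (pvNz m b n).length = n := by
  induction n with
  | zero => intro b; rfl
  | succ n ih => intro b; simp [pvNz, ih]

-- outer loop: processes rows i, i+1, …, k-2 (n of them), consuming blocks of widths n, n-1, …, 1
theorem pv_outer (m k : Int) (n : Nat) :
    ∀ (i : Int) (adj : List (List Int)) (b : Nat),
    0 ≤ i → i + n = k - 1 → adj.length = k.toNat →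
    (∀ r : Nat, i ≤ (r : Int) → r < k.toNat → adj.getD r [] = List.replicate k.toNat (0 : Int)) →
    ((PySem.List.pyRange i (k - 1)).foldl
      (fun (st : List (List Int) × Nat) i =>
        (PySem.List.pyRange (i + 1) k).foldl
          (fun (st : List (List Int) × Nat) j =>
            ((if PySem.Int.band m (1 <<< st.2) ≠ 0 then pvSetIJ st.1 i j 1 else st.1), st.2 + 1))
          st)
      (adj, b)).1.length = k.toNat ∧
    (∀ r : Nat, ((r : Int) < i ∨ i + n ≤ (r : Int)) →
      ((PySem.List.pyRange i (k - 1)).foldl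
        (fun (st : List (List Int) × Nat) i =>
          (PySem.List.pyRange (i + 1) k).foldl
            (fun (st : List (List Int) × Nat) j =>
              ((if PySem.Int.band m (1 <<< st.2) ≠ 0 then pvSetIJ st.1 i j 1 else st.1), st.2 + 1))
            st)
        (adj, b)).1.getD r [] = adj.getD r []) ∧
    (∀ t : Nat, t < n →
      (((PySem.List.pyRange i (k - 1)).foldl
        (fun (st : List (List Int) × Nat) i =>
          (PySem.List.pyRange (i + 1) k).foldl
            (fun (st : List (List Int) × Nat) j =>
              ((if PySem.Int.band m (1 <<< st.2) ≠ 0 then pvSetIJ st.1 i j 1 else st.1), st.2 + 1))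
            st)
        (adj, b)).1.getD (i.toNat + t) []).sum = (pvCount m (b + pvOff n t) (n - t) : Int)) := by
  induction n with
  | zero =>
    intro i adj b hi hik hlen hrows
    have hnil : PySem.List.pyRange i (k - 1) = [] := by
      have : k - 1 ≤ i := by omega
      simp [pysem, this]
    rw [hnil]
    refine ⟨by simpa using hlen, fun r _ => rfl, fun t ht => by omega⟩
  | succ n ih =>
    intro i adj b hi hik hlen hrows
    have hcons : PySem.List.pyRange i (k - 1) = i :: PySem.List.pyRange (i + 1) (k - 1) :=
      PySem.List.pyRange_one_cons (by omega)
    rw [hcons, List.foldl_cons]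
    have hilt : i.toNat < adj.length := by omega
    rw [pv_inner_as_row m _ i adj b hilt]
    have hrow0 : adj.getD i.toNat [] = List.replicate k.toNat (0 : Int) :=
      hrows i.toNat (by omega) (by omega)
    have hkshift : k = (i + 1) + ((n + 1 : Nat) : Int) := by push_cast; omega
    have hrange : PySem.List.pyRange (i + 1) k =
        PySem.List.pyRange (i + 1) ((i + 1) + ((n + 1 : Nat) : Int)) := by rw [← hkshift]
    rw [hrange]
    have hz : ∀ c : Nat, i + 1 ≤ (c : Int) → c < (adj.getD i.toNat []).length →
        (adj.getD i.toNat []).getD c 0 = 0 := by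
      intro c _ hc
      rw [hrow0] at hc ⊢
      simp only [List.length_replicate] at hc
      rw [List.getD_eq_getElem?_getD, List.getElem?_replicate, if_pos hc]
      rfl
    have hrlen : (i + 1) + ((n + 1 : Nat) : Int) ≤ ((adj.getD i.toNat []).length : Int) := by
      rw [hrow0]
      simp
      push_cast
      omega
    obtain ⟨hr1, hr2, hr3⟩ := pv_rowfold m (n + 1) (i + 1) (adj.getD i.toNat []) b (by omega) hrlen hz
    set R := ((PySem.List.pyRange (i + 1) ((i + 1) + ((n + 1 : Nat) : Int))).foldl
      (fun (st : List Int × Nat) jj =>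
        ((if PySem.Int.band m (1 <<< st.2) ≠ 0 then st.1.set jj.toNat 1 else st.1), st.2 + 1))
      (adj.getD i.toNat [], b)) with hR
    have hsetlen : (adj.set i.toNat R.1).length = k.toNat := by simp [hlen]
    have hsetrows : ∀ r : Nat, (i + 1) ≤ (r : Int) → r < k.toNat →
        (adj.set i.toNat R.1).getD r [] = List.replicate k.toNat (0 : Int) := by
      intro r hr hrk
      rw [List.getD_eq_getElem?_getD, List.getElem?_set, if_neg (by omega),
        ← List.getD_eq_getElem?_getD]
      exact hrows r (by omega) hrk
    obtain ⟨ih1, ih2, ih3⟩ := ih (i + 1) (adj.set i.toNat R.1) R.2 (by omega) (by omega) hsetlen hsetrows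
    refine ⟨ih1, ?_, ?_⟩
    · intro r hr
      rw [ih2 r (by omega)]
      rw [List.getD_eq_getElem?_getD, List.getElem?_set, if_neg (by omega),
        ← List.getD_eq_getElem?_getD]
    · intro t ht
      cases t with
      | zero =>
        have hri : (i.toNat : Int) < i + 1 := by omega
        rw [show i.toNat + 0 = i.toNat from rfl, ih2 i.toNat (Or.inl hri)]
        rw [List.getD_eq_getElem _ _ (by simp; omega), List.getElem_set_self]
        rw [hr2, hrow0]
        simp [pvOff]
      | succ t =>
        have hidx : i.toNat + (t + 1) = (i + 1).toNat + t := by omega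
        rw [hidx, ih3 t (by omega), hr1]
        have h1 : pvOff (n + 1) (t + 1) = (n + 1) + pvOff n t := rfl
        have h2 : n + 1 - (t + 1) = n - t := by omega
        rw [h1, h2]
        congr 2
        omega

-- ---- main characterisations ----

theorem pv_A_char (m k : Int) (hk : 1 ≤ k) :
    is_valid_dag_structure m k =
      decide (∀ t, t < k.toNat - 1 → pvCount m (pvOff (k.toNat - 1) t) (k.toNat - 1 - t) ≠ 0) := by
  obtain ⟨kn, hkn, rfl⟩ : ∃ kn : Nat, 1 ≤ kn ∧ k = (kn : Int) := ⟨k.toNat, by omega, by omega⟩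
  simp only [is_valid_dag_structure, mask_to_adj]
  have hadj0 : ((PySem.List.pyRange 0 (kn : Int)).map
      (fun _ => (PySem.List.pyRange 0 (kn : Int)).map (fun _ => (0 : Int)))) =
      List.replicate kn (List.replicate kn (0 : Int)) := by
    rw [PySem.List.pyRange_zero_natCast, List.map_const', List.map_const']
    simp
  simp only [hadj0]
  obtain ⟨h1, h2, h3⟩ := pv_outer m (kn : Int) (kn - 1) 0 (List.replicate kn (List.replicate kn (0 : Int))) 0
    le_rfl (by push_cast; omega) (by simp) (by
      intro r _ hrk
      simp only [Int.toNat_natCast] at hrk ⊢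
      rw [List.getD_eq_getElem?_getD, List.getElem?_replicate, if_pos hrk]
      rfl)
  set ADJ := ((PySem.List.pyRange 0 ((kn : Int) - 1)).foldl
    (fun (st : List (List Int) × Nat) i =>
      (PySem.List.pyRange (i + 1) (kn : Int)).foldl
        (fun (st : List (List Int) × Nat) j =>
          ((if PySem.Int.band m (1 <<< st.2) ≠ 0 then pvSetIJ st.1 i j 1 else st.1), st.2 + 1))
        st)
    (List.replicate kn (List.replicate kn (0 : Int)), 0)).1 with hADJ
  simp only [Int.toNat_natCast] at h1 h2 h3
  set OD := (PySem.List.pyRange 0 ((kn : Int))).map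
      (fun i => ((PySem.List.pyGet? ADJ i).getD []).sum) with hOD
  have hout : ∀ r : Nat, r < kn → (PySem.List.pyGet? OD (r : Int)).getD 0 = (ADJ.getD r []).sum := by
    intro r hr
    rw [hOD, PySem.List.pyGet?_natCast, List.getElem?_map, PySem.List.pyRange_zero_natCast,
      List.getElem?_map, List.getElem?_range hr]
    simp only [Option.map_some, Option.getD_some]
    rw [PySem.List.pyGet?_natCast, List.getElem?_eq_getElem (by omega), Option.getD_some,
      ← List.getD_eq_getElem _ _ (by omega)]
  have hlast : (ADJ.getD (kn - 1) []).sum = 0 := by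
    rw [h2 (kn - 1) (by push_cast; omega)]
    rw [List.getD_eq_getElem?_getD, List.getElem?_replicate, if_pos (by omega)]
    simp
  have hmid : ∀ t : Nat, t < kn - 1 →
      (ADJ.getD t []).sum = (pvCount m (pvOff (kn - 1) t) (kn - 1 - t) : Int) := by
    intro t ht
    have := h3 t ht
    simpa using this
  have hk1 : ((kn : Int)) - 1 = ((kn - 1 : Nat) : Int) := by push_cast; omega
  simp only [hk1]
  rw [PySem.List.pyRange_zero_natCast, List.any_map]
  by_cases hP : ∀ t, t < kn - 1 → pvCount m (pvOff (kn - 1) t) (kn - 1 - t) ≠ 0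
  · have hany : (List.range (kn - 1)).any
        ((fun i => (PySem.List.pyGet? OD i).getD 0 == 0) ∘ (fun t : Nat => (t : Int))) = false := by
      rw [List.any_eq_false]
      intro t htmem
      have ht : t < kn - 1 := List.mem_range.mp htmem
      simp only [Function.comp_apply]
      rw [hout t (by omega), hmid t ht]
      simp
      exact_mod_cast hP t ht
    rw [hany]
    simp only [Bool.false_eq_true, if_false]
    rw [hout (kn - 1) (by omega), hlast]
    simp
    exact fun t ht => hP t ht
  · have hex : ∃ t, t < kn - 1 ∧ pvCount m (pvOff (kn - 1) t) (kn - 1 - t) = 0 := by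
      push_neg at hP
      obtain ⟨t, ht, hc⟩ := hP
      exact ⟨t, ht, by omega⟩
    obtain ⟨t, ht, hc⟩ := hex
    have hany : (List.range (kn - 1)).any
        ((fun i => (PySem.List.pyGet? OD i).getD 0 == 0) ∘ (fun t : Nat => (t : Int))) = true := by
      rw [List.any_eq_true]
      refine ⟨t, List.mem_range.mpr ht, ?_⟩
      simp only [Function.comp_apply]
      rw [hout t (by omega), hmid t ht, hc]
      simp
    rw [hany]
    have hnP : ¬ ∀ t, t < kn - 1 → pvCount m (pvOff (kn - 1) t) (kn - 1 - t) ≠ 0 := hP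
    simp only [if_pos rfl]
    simp [hnP]

theorem pv_B_char (m k : Int) (hk : 1 ≤ k) :
    is_valid_dag_structure_alt m k =
      decide (∀ t, t < k.toNat - 1 →
        PySem.Int.mod (m >>> pvOff (k.toNat - 1) t) ((1 <<< (k.toNat - 1 - t) : Nat) : Int) ≠ 0) := by
  obtain ⟨kn, hkn, rfl⟩ : ∃ kn : Nat, 1 ≤ kn ∧ k = (kn : Int) := ⟨k.toNat, by omega, by omega⟩
  simp only [is_valid_dag_structure_alt]
  simp only [pv_nzfold m (kn : Int) kn 0 [] 0 (by push_cast; omega)]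
  simp only [List.nil_append]
  have hknt : ((kn : Int)).toNat = kn := by simp
  have hlen : (pvNz m 0 kn).length = kn := pv_nz_length m kn 0
  have hnzget : ∀ t : Nat, t < kn →
      (PySem.List.pyGet? (pvNz m 0 kn) (t : Int)).getD false = (pvNz m 0 kn).getD t false := by
    intro t ht
    rw [PySem.List.pyGet?_natCast, ← List.getD_eq_getElem?_getD]
  have hkn' : kn = (kn - 1) + 1 := by omega
  have hval : ∀ t : Nat, t ≤ kn - 1 →
      (pvNz m 0 kn).getD t false =
        decide (PySem.Int.mod (m >>> (pvOff (kn - 1) t)) ((1 <<< (kn - 1 - t) : Nat) : Int) ≠ 0) := by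
    intro t ht
    rw [hkn']
    rw [pv_nz_getD m t (kn - 1) 0 ht]
    norm_num
  have hlastval : (pvNz m 0 kn).getD (kn - 1) false = false := by
    rw [hval (kn - 1) le_rfl]
    have hw : kn - 1 - (kn - 1) = 0 := by omega
    rw [hw]
    have h1 : ((1 <<< 0 : Nat) : Int) = 1 := by decide
    rw [h1, PySem.Int.mod_eq_emod_of_pos (by omega)]
    simp
  have hk1 : ((kn : Int)) - 1 = ((kn - 1 : Nat) : Int) := by push_cast; omega
  simp only [hk1, PySem.List.pyRange_zero_natCast, List.any_map]
  by_cases hP : ∀ t, t < kn - 1 →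
      PySem.Int.mod (m >>> pvOff (kn - 1) t) ((1 <<< (kn - 1 - t) : Nat) : Int) ≠ 0
  · have hany : (List.range (kn - 1)).any
        ((fun i => !(PySem.List.pyGet? (pvNz m 0 kn) i).getD false) ∘ (fun t : Nat => (t : Int))) = false := by
      rw [List.any_eq_false]
      intro t htmem
      have ht : t < kn - 1 := List.mem_range.mp htmem
      simp only [Function.comp_apply]
      rw [hnzget t (by omega), hval t (by omega)]
      simp
      exact hP t ht
    rw [hany]
    simp only [Bool.false_eq_true, if_false]
    rw [hnzget (kn - 1) (by omega), hlastval]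
    simp only [Bool.false_eq_true, if_false]
    symm
    rw [decide_eq_true_eq]
    intro t ht
    exact hP t ht
  · have hex : ∃ t, t < kn - 1 ∧
        PySem.Int.mod (m >>> pvOff (kn - 1) t) ((1 <<< (kn - 1 - t) : Nat) : Int) = 0 := by
      push_neg at hP
      obtain ⟨t, ht, hc⟩ := hP
      exact ⟨t, ht, hc⟩
    obtain ⟨t, ht, hc⟩ := hex
    have hany : (List.range (kn - 1)).any
        ((fun i => !(PySem.List.pyGet? (pvNz m 0 kn) i).getD false) ∘ (fun t : Nat => (t : Int))) = true := by
      rw [List.any_eq_true]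
      refine ⟨t, List.mem_range.mpr ht, ?_⟩
      simp only [Function.comp_apply]
      rw [hnzget t (by omega), hval t (by omega), hc]
      simp
    rw [hany]
    simp
    exact ⟨t, ht, by simpa using hc⟩

-- ===== VERDICT (by name: the statement is the Claim_ definition above) =====
theorem is_valid_dag_structure_spec : Claim_equal_is_valid_dag_structure := by
  intro m k _ hk
  unfold Spec_is_valid_dag_structure
  have hk' : 1 ≤ k := hk
  rw [pv_A_char m k hk', pv_B_char m k hk']
  congr 1
  apply propext
  constructor <;> intro h t ht
  · exact (pv_mod_count m _ _).mpr (h t ht)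
  · exact (pv_mod_count m _ _).mp (h t ht)
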